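-- pv_equiv track=rewrite | github.com/urwrstkn8mare/galaxy-integration-steam | src/leveldb_parser.py | dynamic_collection_can_be_processed
-- ===== SOURCE A (Python) =====
-- def dynamic_collection_can_be_processed(collection):
--     empty = True
--     for rg_group in collection:
--         if collection[rg_group]:
--             if rg_group == 0:
--                 # Unused field, only one with 'bAcceptUnion': True
--                 empty = False
--                 return False
--             if rg_group == 1:
--                 # Play State tags ("Installed" etc) , not taken into consideration
--                 empty = False
--                 return False
--             if rg_group == 2:
--                 # temp
--                 empty = False
--                 if 3 in collection[rg_group]:
--                     # VR tag, unsupported atm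
--                     return False
--             if rg_group == 3:
--                 # Empty field
--                 empty = False
--                 return False
--             if rg_group == 4:
--                 empty = False
--     if empty:
--         return False
--     return True
-- ===== SOURCE B (Python) =====
-- def dynamic_collection_can_be_processed(collection):
--     if collection.get(0) or collection.get(1) or collection.get(3):
--         return False
--     g2 = collection.get(2)
--     if g2 and 3 in g2:
--         return False
--     return bool(g2 or collection.get(4))
-- ===== Notes on version B (the rewrite author's own statement) =====
-- stated objective: simpler
-- what changed: Replaced the key-iterating loop with its early returns and the mutable 'empty' flag by five direct dict lookups: reject on truthy key 0/1/3 or a truthy key 2 containing 3, else succeed iff key 2 or key 4 is truthy.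
import Mathlib
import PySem

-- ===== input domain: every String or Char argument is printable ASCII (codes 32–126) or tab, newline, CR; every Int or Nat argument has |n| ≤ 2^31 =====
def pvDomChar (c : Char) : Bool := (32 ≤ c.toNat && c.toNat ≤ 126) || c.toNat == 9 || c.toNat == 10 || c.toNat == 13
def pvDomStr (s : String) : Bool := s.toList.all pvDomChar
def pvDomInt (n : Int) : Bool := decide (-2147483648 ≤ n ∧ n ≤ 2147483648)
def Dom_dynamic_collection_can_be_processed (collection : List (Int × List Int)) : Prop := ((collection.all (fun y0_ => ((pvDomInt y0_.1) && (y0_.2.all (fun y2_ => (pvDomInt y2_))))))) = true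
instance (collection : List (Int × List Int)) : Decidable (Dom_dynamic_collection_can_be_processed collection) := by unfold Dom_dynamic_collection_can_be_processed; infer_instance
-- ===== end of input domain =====

-- B replaces A's key-iterating loop with early returns and a mutable 'empty' flag
-- by a constant number of direct key lookups (objective: simpler).

-- shared helper: first-match association-list lookup, [] when the key is absent
-- (= Python's collection[k] / collection.get(k) truthiness carrier)
def pvLookup (c : List (Int × List Int)) (k : Int) : List Int :=
  match c with
  | [] => []
  | (k', v) :: rest => if k' = k then v else pvLookup rest k

-- ===== PORT A =====
-- the loop body of A: iterate the dict's keys, carrying the 'empty' flag; early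
-- returns become immediate 'false' results
def dccbp_go (c : List (Int × List Int)) : List Int → Bool → Bool
  | [], empty => if empty then false else true
  | k :: ks, empty =>
    if pvLookup c k ≠ [] then
      if k = 0 then false
      else if k = 1 then false
      else if k = 2 then
        if 3 ∈ pvLookup c k then false else dccbp_go c ks false
      else if k = 3 then false
      else if k = 4 then dccbp_go c ks false
      else dccbp_go c ks empty
    else dccbp_go c ks empty

def dynamic_collection_can_be_processed (collection : List (Int × List Int)) : Bool :=
  dccbp_go collection (collection.map Prod.fst) true

-- ===== PORT B =====
def dynamic_collection_can_be_processed_alt (collection : List (Int × List Int)) : Bool :=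
  if pvLookup collection 0 ≠ [] ∨ pvLookup collection 1 ≠ [] ∨ pvLookup collection 3 ≠ [] then
    false
  else
    let g2 := pvLookup collection 2
    if g2 ≠ [] ∧ 3 ∈ g2 then false
    else decide (g2 ≠ [] ∨ pvLookup collection 4 ≠ [])

-- ===== PRECONDITION & SPEC =====
def Spec_dynamic_collection_can_be_processed (collection : List (Int × List Int)) (out : Bool) : Prop := out = dynamic_collection_can_be_processed_alt collection
instance (collection : List (Int × List Int)) (out : Bool) : Decidable (Spec_dynamic_collection_can_be_processed collection out) := by unfold Spec_dynamic_collection_can_be_processed; infer_instance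

-- ===== CLAIM (what is proved, stated in full; the proofs are below) =====
def Claim_equal_dynamic_collection_can_be_processed : Prop := ∀ (collection : List (Int × List Int)), Dom_dynamic_collection_can_be_processed collection → Spec_dynamic_collection_can_be_processed collection (dynamic_collection_can_be_processed collection)

-- ===== LEMMAS AND PROOFS =====

-- a key k makes A return False from inside the loop
def pvBad (c : List (Int × List Int)) (k : Int) : Bool :=
  decide (pvLookup c k ≠ []) &&
    (k == 0 || k == 1 || k == 3 || (k == 2 && decide ((3 : Int) ∈ pvLookup c k)))

-- a key k clears A's 'empty' flag
def pvCnt (c : List (Int × List Int)) (k : Int) : Bool :=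
  decide (pvLookup c k ≠ []) && (k == 0 || k == 1 || k == 2 || k == 3 || k == 4)

theorem pvLookup_ne_nil_mem (c : List (Int × List Int)) (k : Int)
    (h : pvLookup c k ≠ []) : k ∈ c.map Prod.fst := by
  induction c with
  | nil => simp [pvLookup] at h
  | cons p rest ih =>
    obtain ⟨k', v⟩ := p
    by_cases hk : k' = k
    · simp [hk]
    · simp only [pvLookup, if_neg hk] at h
      simpa using Or.inr (ih h)

theorem dccbp_go_spec (c : List (Int × List Int)) (ks : List Int) (empty : Bool) :
    dccbp_go c ks empty =
      if ks.any (pvBad c) then false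
      else if empty && !(ks.any (pvCnt c)) then false
      else true := by
  induction ks generalizing empty with
  | nil => cases empty <;> simp [dccbp_go]
  | cons k ks ih =>
    by_cases hv : pvLookup c k = []
    · have hb : pvBad c k = false := by simp [pvBad, hv]
      have hc : pvCnt c k = false := by simp [pvCnt, hv]
      rw [show dccbp_go c (k :: ks) empty = dccbp_go c ks empty from by
            simp [dccbp_go, hv]]
      rw [ih]
      simp [List.any_cons, hb, hc]
    · by_cases h0 : k = 0
      · subst h0
        have hb : pvBad c 0 = true := by simp [pvBad, hv]
        rw [show dccbp_go c (0 :: ks) empty = false from by simp [dccbp_go, hv]]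
        simp [List.any_cons, hb]
      by_cases h1 : k = 1
      · subst h1
        have hb : pvBad c 1 = true := by simp [pvBad, hv]
        rw [show dccbp_go c (1 :: ks) empty = false from by simp [dccbp_go, hv]]
        simp [List.any_cons, hb]
      by_cases h2 : k = 2
      · subst h2
        by_cases h3m : (3 : Int) ∈ pvLookup c 2
        · have hb : pvBad c 2 = true := by simp [pvBad, hv, h3m]
          rw [show dccbp_go c (2 :: ks) empty = false from by
                simp [dccbp_go, hv, h3m]]
          simp [List.any_cons, hb]
        · have hb : pvBad c 2 = false := by simp [pvBad, h3m]
          have hc : pvCnt c 2 = true := by simp [pvCnt, hv]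
          rw [show dccbp_go c (2 :: ks) empty = dccbp_go c ks false from by
                simp [dccbp_go, hv, h3m]]
          rw [ih]
          simp [List.any_cons, hb, hc]
      by_cases h3 : k = 3
      · subst h3
        have hb : pvBad c 3 = true := by simp [pvBad, hv]
        rw [show dccbp_go c (3 :: ks) empty = false from by
              simp [dccbp_go, hv, h0, h1, h2]]
        simp [List.any_cons, hb]
      by_cases h4 : k = 4
      · subst h4
        have hb : pvBad c 4 = false := by simp [pvBad]
        have hc : pvCnt c 4 = true := by simp [pvCnt, hv]
        rw [show dccbp_go c (4 :: ks) empty = dccbp_go c ks false from by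
              simp [dccbp_go, hv]]
        rw [ih]
        simp [List.any_cons, hb, hc]
      · have hb : pvBad c k = false := by simp [pvBad, h0, h1, h2, h3]
        have hc : pvCnt c k = false := by simp [pvCnt, h0, h1, h2, h3, h4]
        rw [show dccbp_go c (k :: ks) empty = dccbp_go c ks empty from by
              simp [dccbp_go, hv, h0, h1, h2, h3, h4]]
        rw [ih]
        simp [List.any_cons, hb, hc]

theorem any_bad_iff (c : List (Int × List Int)) :
    (c.map Prod.fst).any (pvBad c) = true ↔
      (pvLookup c 0 ≠ [] ∨ pvLookup c 1 ≠ [] ∨ pvLookup c 3 ≠ [] ∨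
        (pvLookup c 2 ≠ [] ∧ (3 : Int) ∈ pvLookup c 2)) := by
  rw [List.any_eq_true]
  constructor
  · rintro ⟨k, -, hk⟩
    simp only [pvBad, Bool.and_eq_true, Bool.or_eq_true, beq_iff_eq, decide_eq_true_eq] at hk
    obtain ⟨hne, ((h | h) | h) | ⟨h, hm⟩⟩ := hk <;> subst h <;> tauto
  · rintro (h | h | h | ⟨h, hm⟩)
    · exact ⟨0, pvLookup_ne_nil_mem c 0 h, by simp [pvBad, h]⟩
    · exact ⟨1, pvLookup_ne_nil_mem c 1 h, by simp [pvBad, h]⟩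
    · exact ⟨3, pvLookup_ne_nil_mem c 3 h, by simp [pvBad, h]⟩
    · exact ⟨2, pvLookup_ne_nil_mem c 2 h, by simp [pvBad, h, hm]⟩

theorem any_cnt_iff (c : List (Int × List Int)) :
    (c.map Prod.fst).any (pvCnt c) = true ↔
      (pvLookup c 0 ≠ [] ∨ pvLookup c 1 ≠ [] ∨ pvLookup c 2 ≠ [] ∨
        pvLookup c 3 ≠ [] ∨ pvLookup c 4 ≠ []) := by
  rw [List.any_eq_true]
  constructor
  · rintro ⟨k, -, hk⟩
    simp only [pvCnt, Bool.and_eq_true, Bool.or_eq_true, beq_iff_eq, decide_eq_true_eq] at hk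
    obtain ⟨hne, (((h | h) | h) | h) | h⟩ := hk <;> subst h <;> tauto
  · rintro (h | h | h | h | h)
    · exact ⟨0, pvLookup_ne_nil_mem c 0 h, by simp [pvCnt, h]⟩
    · exact ⟨1, pvLookup_ne_nil_mem c 1 h, by simp [pvCnt, h]⟩
    · exact ⟨2, pvLookup_ne_nil_mem c 2 h, by simp [pvCnt, h]⟩
    · exact ⟨3, pvLookup_ne_nil_mem c 3 h, by simp [pvCnt, h]⟩
    · exact ⟨4, pvLookup_ne_nil_mem c 4 h, by simp [pvCnt, h]⟩

-- ===== VERDICT (by name: the statement is the Claim_ definition above) =====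
theorem dynamic_collection_can_be_processed_spec : Claim_equal_dynamic_collection_can_be_processed := by
  intro c _
  unfold Spec_dynamic_collection_can_be_processed
  unfold dynamic_collection_can_be_processed dynamic_collection_can_be_processed_alt
  rw [dccbp_go_spec]
  by_cases hbad : (c.map Prod.fst).any (pvBad c) = true
  · rw [if_pos hbad]
    have h := (any_bad_iff c).mp hbad
    by_cases hfirst : pvLookup c 0 ≠ [] ∨ pvLookup c 1 ≠ [] ∨ pvLookup c 3 ≠ []
    · rw [if_pos hfirst]
    · rw [if_neg hfirst]
      have h23 : pvLookup c 2 ≠ [] ∧ (3 : Int) ∈ pvLookup c 2 := by tauto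
      simp only [if_pos h23]
  · rw [if_neg hbad]
    have h : ¬ (pvLookup c 0 ≠ [] ∨ pvLookup c 1 ≠ [] ∨ pvLookup c 3 ≠ [] ∨
        (pvLookup c 2 ≠ [] ∧ (3 : Int) ∈ pvLookup c 2)) := fun hh => hbad ((any_bad_iff c).mpr hh)
    have hfirst : ¬ (pvLookup c 0 ≠ [] ∨ pvLookup c 1 ≠ [] ∨ pvLookup c 3 ≠ []) := by tauto
    rw [if_neg hfirst]
    have h23 : ¬ (pvLookup c 2 ≠ [] ∧ (3 : Int) ∈ pvLookup c 2) := by tauto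
    rw [if_neg h23]
    by_cases hcnt : (c.map Prod.fst).any (pvCnt c) = true
    · have hc := (any_cnt_iff c).mp hcnt
      have h24 : pvLookup c 2 ≠ [] ∨ pvLookup c 4 ≠ [] := by tauto
      rw [if_neg (by simp [hcnt])]
      simp [h24]
    · have hc : ¬ (pvLookup c 0 ≠ [] ∨ pvLookup c 1 ≠ [] ∨ pvLookup c 2 ≠ [] ∨
          pvLookup c 3 ≠ [] ∨ pvLookup c 4 ≠ []) := fun hh => hcnt ((any_cnt_iff c).mpr hh)
      rw [if_pos (by simp [Bool.not_eq_true] at hcnt; simpa using hcnt)]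
      have h24 : ¬ (pvLookup c 2 ≠ [] ∨ pvLookup c 4 ≠ []) := by tauto
      simp [h24]
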